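-- pv_equiv track=rewrite | github.com/DennySORA/Daily-Paper-Report | src/features/store/url.py | _should_upgrade_to_https
-- ===== SOURCE A (Python) =====
-- def _should_upgrade_to_https(netloc: str) -> bool:
--     """Check if a host should be upgraded to HTTPS.
--
--     Args:
--         netloc: The network location (host:port).
--
--     Returns:
--         True if the host should use HTTPS.
--     """
--     # List of known sites that support HTTPS
--     https_hosts = {
--         "arxiv.org",
--         "github.com",
--         "huggingface.co",
--         "openreview.net",
--         "paperswithcode.com",
--         "aclanthology.org",
--     }
--
--     # Extract host without port
--     host = netloc.split(":")[0]
--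
--     # Check exact match or subdomain
--     for known_host in https_hosts:
--         if host == known_host or host.endswith(f".{known_host}"):
--             return True
--
--     return False
-- ===== SOURCE B (Python) =====
-- def _should_upgrade_to_https(netloc: str) -> bool:
--     """Check if a host should be upgraded to HTTPS.
--
--     Instead of scanning the known-host list with endswith, loop over the
--     suffixes of the host that start at the beginning or right after a dot,
--     and test each candidate with an O(1) set lookup.
--     """
--     https_hosts = {
--         "arxiv.org",
--         "github.com",
--         "huggingface.co",
--         "openreview.net",
--         "paperswithcode.com",
--         "aclanthology.org",
--     }
--
--     host = netloc.split(":")[0]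
--
--     for i in range(len(host)):
--         if (i == 0 or host[i - 1] == ".") and host[i:] in https_hosts:
--             return True
--     return False
-- ===== Notes on version B (the rewrite author's own statement) =====
-- stated objective: alternative
-- what changed: B inverts the search: instead of scanning the known-host list and testing each with endswith, it loops over the host's dot-boundary suffixes and checks each candidate by set membership.
import Mathlib
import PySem

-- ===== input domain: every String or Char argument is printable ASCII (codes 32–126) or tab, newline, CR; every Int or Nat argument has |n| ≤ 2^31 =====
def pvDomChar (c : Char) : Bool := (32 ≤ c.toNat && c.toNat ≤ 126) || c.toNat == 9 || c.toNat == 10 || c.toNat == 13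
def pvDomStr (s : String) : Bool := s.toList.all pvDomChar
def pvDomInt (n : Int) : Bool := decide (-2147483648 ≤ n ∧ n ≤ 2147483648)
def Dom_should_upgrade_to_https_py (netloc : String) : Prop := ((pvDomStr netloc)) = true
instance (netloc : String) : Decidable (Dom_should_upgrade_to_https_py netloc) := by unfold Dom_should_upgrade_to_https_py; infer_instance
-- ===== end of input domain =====

-- B replaces A's scan of the known-host list (exact match or endswith) by a loop over the
-- host's dot-boundary suffixes with a set-membership test for each candidate (objective: alternative).

-- the six known HTTPS hosts, in source order (shared literal data of both programs)
def pvHttpsHosts : List (List Char) :=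
  ["arxiv.org".toList, "github.com".toList, "huggingface.co".toList,
   "openreview.net".toList, "paperswithcode.com".toList, "aclanthology.org".toList]

-- ===== PORT A =====
-- Python iterates over a set literal; the loop's result is an order-independent OR, ported in source order.
def pvLoopA : List (List Char) → List Char → Bool
  | [], _ => false
  | k :: rest, host =>
    if host == k || PySem.Chars.endswith host ('.' :: k) then true
    else pvLoopA rest host

def should_upgrade_to_https_py (netloc : String) : Bool :=
  -- host = netloc.split(":")[0]; split always returns at least one piece, so [0] never raises
  let host := PySem.List.pyGetD (PySem.Chars.splitOn netloc.toList [':']) 0 []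
  pvLoopA pvHttpsHosts host

-- ===== PORT B =====
-- for i in range(len(host)): if (i == 0 or host[i-1] == ".") and host[i:] in https_hosts: return True
-- (Python only evaluates host[i-1] when i ≥ 1, where it is in range, so the pyGetD default is inert)
def pvLoopB (host : List Char) (hosts : PySem.Set (List Char)) : List Int → Bool
  | [] => false
  | i :: rest =>
    if (i == 0 || PySem.List.pyGetD host (i - 1) ' ' == '.')
        && hosts.contains (PySem.Chars.slice host (some i) none) then true
    else pvLoopB host hosts rest

def should_upgrade_to_https_py_alt (netloc : String) : Bool :=
  let host := PySem.List.pyGetD (PySem.Chars.splitOn netloc.toList [':']) 0 []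
  let hosts := PySem.Set.ofList pvHttpsHosts
  pvLoopB host hosts (PySem.List.pyRange 0 (PySem.List.len host) 1)

-- ===== PRECONDITION & SPEC =====
def Spec_should_upgrade_to_https_py (netloc : String) (out : Bool) : Prop := out = should_upgrade_to_https_py_alt netloc
instance (netloc : String) (out : Bool) : Decidable (Spec_should_upgrade_to_https_py netloc out) := by unfold Spec_should_upgrade_to_https_py; infer_instance

-- ===== CLAIM (what is proved, stated in full; the proofs are below) =====
def Claim_equal_should_upgrade_to_https_py : Prop := ∀ (netloc : String), Dom_should_upgrade_to_https_py netloc → Spec_should_upgrade_to_https_py netloc (should_upgrade_to_https_py netloc)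

-- ===== LEMMAS AND PROOFS =====

lemma pv_hosts_ne : ∀ k ∈ pvHttpsHosts, k ≠ [] := by decide

-- A's loop is an OR over the known hosts
lemma pvLoopA_eq_true_iff (ks : List (List Char)) (h : List Char) :
    pvLoopA ks h = true ↔ ∃ k ∈ ks, h = k ∨ ('.' :: k) <:+ h := by
  induction ks with
  | nil => simp [pvLoopA]
  | cons k rest ih =>
    simp only [pvLoopA]
    split_ifs with hc
    · simp only [true_iff]
      rcases (by simpa [PySem.Chars.endswith_iff] using hc : h = k ∨ ('.' :: k) <:+ h) with hc' | hc'
      · exact ⟨k, by simp, Or.inl hc'⟩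
      · exact ⟨k, by simp, Or.inr hc'⟩
    · rw [ih]
      constructor
      · rintro ⟨k', hk', hor⟩; exact ⟨k', List.mem_cons_of_mem _ hk', hor⟩
      · rintro ⟨k', hk', hor⟩
        rcases List.mem_cons.mp hk' with rfl | hk''
        · exact absurd (by simpa [PySem.Chars.endswith_iff] using hor)
            (by simpa [PySem.Chars.endswith_iff] using hc)
        · exact ⟨k', hk'', hor⟩

-- B's loop is an OR over the candidate indices
lemma pvLoopB_eq_true_iff (host : List Char) (s : PySem.Set (List Char)) (is : List Int) :
    pvLoopB host s is = true ↔ ∃ i ∈ is,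
      (i = 0 ∨ PySem.List.pyGetD host (i - 1) ' ' = '.') ∧
        PySem.Chars.slice host (some i) none ∈ s := by
  induction is with
  | nil => simp [pvLoopB]
  | cons i rest ih =>
    simp only [pvLoopB]
    split_ifs with hc
    · simp only [true_iff]
      refine ⟨i, by simp, ?_, ?_⟩
      · rcases Bool.or_eq_true_iff.mp (Bool.and_eq_true_iff.mp hc).1 with h1 | h1
        · exact Or.inl (by simpa using h1)
        · exact Or.inr (by simpa using h1)
      · exact (PySem.Set.contains_iff s _).mp (Bool.and_eq_true_iff.mp hc).2
    · rw [ih]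
      constructor
      · rintro ⟨j, hj, hrest⟩; exact ⟨j, List.mem_cons_of_mem _ hj, hrest⟩
      · rintro ⟨j, hj, hcond, hmem⟩
        rcases List.mem_cons.mp hj with rfl | hj'
        · refine absurd (Bool.and_eq_true_iff.mpr ⟨?_, (PySem.Set.contains_iff s _).mpr hmem⟩) hc
          rcases hcond with h1 | h1
          · exact Bool.or_eq_true_iff.mpr (Or.inl (by simpa using h1))
          · exact Bool.or_eq_true_iff.mpr (Or.inr (by simpa using h1))
        · exact ⟨j, hj', hcond, hmem⟩

-- h equals k or ends with "."++k  ⟺  k is a dot-boundary suffix h.drop n of h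
lemma pv_key (h k : List Char) (hk : k ≠ []) :
    (h = k ∨ ('.' :: k) <:+ h) ↔
      ∃ n : Nat, n < h.length ∧ (n = 0 ∨ h.getD (n - 1) ' ' = '.') ∧ h.drop n = k := by
  constructor
  · rintro (rfl | ⟨p, hp⟩)
    · refine ⟨0, ?_, Or.inl rfl, rfl⟩
      cases h with
      | nil => exact absurd rfl hk
      | cons a t => simp
    · subst hp
      refine ⟨p.length + 1, ?_, Or.inr ?_, ?_⟩
      · cases k with
        | nil => exact absurd rfl hk
        | cons a t => simp
      · simp only [Nat.add_sub_cancel]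
        rw [List.getD_eq_getElem?_getD, List.getElem?_append_right (le_refl p.length)]
        simp
      · rw [show p ++ '.' :: k = (p ++ ['.']) ++ k by simp,
            show p.length + 1 = (p ++ ['.']).length by simp, List.drop_left]
  · rintro ⟨n, hn, hcond, hdrop⟩
    by_cases hz : n = 0
    · subst hz; exact Or.inl (show k = h by simpa using hdrop.symm).symm
    · right
      have h1 : 1 ≤ n := Nat.one_le_iff_ne_zero.mpr hz
      have hlt : n - 1 < h.length := by omega
      have hdot : h.getD (n - 1) ' ' = '.' := by
        rcases hcond with h0 | hd
        · exact absurd h0 hz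
        · exact hd
      have hch : h[n - 1] = '.' := by
        rwa [List.getD_eq_getElem?_getD, List.getElem?_eq_getElem hlt, Option.getD_some] at hdot
      have htake : h.take n = h.take (n - 1) ++ ['.'] := by
        conv_lhs => rw [show n = (n - 1) + 1 by omega]
        rw [List.take_add_one]
        simp [List.getElem?_eq_getElem hlt, hch]
      have hh : h = h.take (n - 1) ++ '.' :: k := by
        conv_lhs => rw [← List.take_append_drop n h]
        rw [htake, hdrop]; simp
      exact ⟨h.take (n - 1), hh.symm⟩

-- the two loops agree on every host
lemma pv_bridge (host : List Char) :
    pvLoopA pvHttpsHosts host =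
      pvLoopB host (PySem.Set.ofList pvHttpsHosts)
        (PySem.List.pyRange 0 (PySem.List.len host) 1) := by
  rw [Bool.eq_iff_iff, pvLoopA_eq_true_iff, pvLoopB_eq_true_iff, PySem.List.len_eq,
      PySem.List.pyRange_zero_natCast]
  constructor
  · rintro ⟨k, hkmem, hor⟩
    obtain ⟨n, hn, hcond, hdrop⟩ := (pv_key host k (pv_hosts_ne k hkmem)).mp hor
    refine ⟨(n : Int), List.mem_map.mpr ⟨n, List.mem_range.mpr hn, rfl⟩, ?_, ?_⟩
    · by_cases hz : n = 0
      · exact Or.inl (by simp [hz])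
      · right
        have h1 : 1 ≤ n := Nat.one_le_iff_ne_zero.mpr hz
        rw [show ((n : Int) - 1) = ((n - 1 : Nat) : Int) by omega, PySem.List.pyGetD_natCast]
        rcases hcond with h0 | hd
        · exact absurd h0 hz
        · exact hd
    · rw [PySem.Chars.slice_eq_listSlice, PySem.List.slice_from_natCast, hdrop]
      exact (PySem.Set.mem_ofList _ _).mpr hkmem
  · rintro ⟨i, hi, hcond, hmem⟩
    obtain ⟨n, hnr, rfl⟩ := List.mem_map.mp hi
    rw [PySem.Chars.slice_eq_listSlice, PySem.List.slice_from_natCast] at hmem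
    have hkmem := (PySem.Set.mem_ofList _ _).mp hmem
    refine ⟨host.drop n, hkmem,
      (pv_key host _ (pv_hosts_ne _ hkmem)).mpr ⟨n, List.mem_range.mp hnr, ?_, rfl⟩⟩
    by_cases hz : n = 0
    · exact Or.inl hz
    · right
      have h1 : 1 ≤ n := Nat.one_le_iff_ne_zero.mpr hz
      rcases hcond with h0 | hdot
      · exact absurd (by exact_mod_cast h0) hz
      · rwa [show ((n : Int) - 1) = ((n - 1 : Nat) : Int) by omega,
             PySem.List.pyGetD_natCast] at hdot

-- ===== VERDICT (by name: the statement is the Claim_ definition above) =====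
theorem should_upgrade_to_https_py_spec : Claim_equal_should_upgrade_to_https_py := by
  intro netloc _
  unfold Spec_should_upgrade_to_https_py should_upgrade_to_https_py should_upgrade_to_https_py_alt
  exact pv_bridge _
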